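-- pv_equiv track=rewrite | github.com/Nev-l/legends-builder | export_wheels.py | _read_rect
-- ===== SOURCE A (Python) =====
-- def _read_rect(data, off):
--     nb = data[off] >> 3
--     if nb == 0: return 0, 0, 0, 0, 1
--     tb = 5 + nb * 4; nb_bytes = (tb + 7) // 8
--     val = 0
--     for i in range(nb_bytes): val = (val << 8) | data[off + i]
--     val >>= (nb_bytes * 8 - tb)
--     mask = (1 << nb) - 1
--     def s(v): return v - (1 << nb) if v >= (1 << (nb - 1)) else v
--     return (s((val >> (3*nb)) & mask), s((val >> nb) & mask),
--             max(0, s((val >> (2*nb)) & mask) - s((val >> (3*nb)) & mask)),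
--             max(0, s(val & mask) - s((val >> nb) & mask)), nb_bytes)
-- ===== SOURCE B (Python) =====
-- def _read_rect(data, off):
--     nb = data[off] >> 3
--     if nb == 0:
--         return 0, 0, 0, 0, 1
--     half, full = 1 << (nb - 1), 1 << nb
--
--     def bit(p):
--         return (data[off + p // 8] >> (7 - p % 8)) & 1
--
--     def field(k):
--         v = 0
--         for p in range(5 + k * nb, 5 + (k + 1) * nb):
--             v = (v << 1) | bit(p)
--         return v - full if v >= half else v
--
--     xmin, xmax, ymin, ymax = field(0), field(1), field(2), field(3)
--     return xmin, ymin, max(0, xmax - xmin), max(0, ymax - ymin), (5 + nb * 4 + 7) // 8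
-- ===== Notes on version B (the rewrite author's own statement) =====
-- stated objective: alternative
-- what changed: B replaces A's accumulate-all-bytes-into-one-big-integer-then-shift/mask decoding by a forward bit reader: a cursor starts at bit 5 and reads the four nb-bit fields bit by bit directly from the byte at data[off + pos//8], so no combined integer, shift-out padding or masks are ever built.
-- outside the precondition, e.g. on _read_rect([8, 300], 0): A returns (0, -1, 0, 1, 2), B returns (0, 0, 0, 0, 2)
import Mathlib
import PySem

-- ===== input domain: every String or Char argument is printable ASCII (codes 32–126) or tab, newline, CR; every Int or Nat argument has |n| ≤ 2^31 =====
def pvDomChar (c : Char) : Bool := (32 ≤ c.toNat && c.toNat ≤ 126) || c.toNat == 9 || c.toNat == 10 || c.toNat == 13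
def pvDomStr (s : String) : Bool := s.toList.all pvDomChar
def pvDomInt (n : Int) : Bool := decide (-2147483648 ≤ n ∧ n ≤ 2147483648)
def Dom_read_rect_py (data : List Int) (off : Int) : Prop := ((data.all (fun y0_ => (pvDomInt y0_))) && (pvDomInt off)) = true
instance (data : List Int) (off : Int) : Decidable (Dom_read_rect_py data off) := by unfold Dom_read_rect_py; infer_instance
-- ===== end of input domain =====

-- B replaces A's build-one-big-integer-then-mask decoding by a forward bit reader that
-- reads the four nb-bit fields bit by bit (objective: alternative decomposition, same cost).

-- ===== PORT A =====
-- literal transliteration of A: big-integer accumulation over all nb_bytes bytes, then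
-- shift/mask extraction of the four fields.  The `none` branches are Python's IndexError
-- (excluded by Pre_); the value returned there is a dummy.
def read_rect_py (data : List Int) (off : Int) : Int × Int × Int × Int × Int :=
  match PySem.List.pyGet? data off with
  | none => (0, 0, 0, 0, 0)   -- IndexError (outside Pre_)
  | some b0 =>
    let nb : Int := b0 >>> (3 : Nat)
    if nb == 0 then (0, 0, 0, 0, 1) else
      let tb : Int := 5 + nb * 4
      let nb_bytes : Int := PySem.Int.floordiv (tb + 7) 8
      let val? : Option Int := (PySem.List.pyRange 0 nb_bytes 1).foldl
        (fun acc i => acc.bind fun v => (PySem.List.pyGet? data (off + i)).map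
          fun b => PySem.Int.bor (v <<< (8 : Nat)) b) (some 0)
      match val? with
      | none => (0, 0, 0, 0, 0)   -- IndexError (outside Pre_)
      | some v0 =>
        -- shift counts are nonnegative whenever Python does not raise; .toNat is exact there
        let val : Int := v0 >>> (nb_bytes * 8 - tb).toNat
        let mask : Int := (1 <<< nb.toNat) - 1
        let s : Int → Int := fun v =>
          if v ≥ 1 <<< (nb - 1).toNat then v - 1 <<< nb.toNat else v
        (s (PySem.Int.band (val >>> (3 * nb).toNat) mask),
         s (PySem.Int.band (val >>> nb.toNat) mask),
         max 0 (s (PySem.Int.band (val >>> (2 * nb).toNat) mask) -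
                s (PySem.Int.band (val >>> (3 * nb).toNat) mask)),
         max 0 (s (PySem.Int.band val mask) - s (PySem.Int.band (val >>> nb.toNat) mask)),
         nb_bytes)

-- ===== PORT B =====
-- bit(p) of Source B: the p-th bit (MSB first) of the byte stream starting at data[off]
def pvBit (data : List Int) (off p : Int) : Option Int :=
  (PySem.List.pyGet? data (off + PySem.Int.floordiv p 8)).map
    fun (b : Int) => PySem.Int.band (b >>> (7 - PySem.Int.mod p 8).toNat) (1 : Int)

-- field(k) of Source B: read nb consecutive bits starting at bit 5 + k*nb, then sign-convert
def pvField (data : List Int) (off nb : Int) (k : Int) : Option Int :=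
  ((PySem.List.pyRange (5 + k * nb) (5 + (k + 1) * nb) 1).foldl
      (fun acc p => acc.bind fun v => (pvBit data off p).map
        fun b => PySem.Int.bor (v <<< (1 : Nat)) b) (some 0)).map
    fun (v : Int) => if v ≥ 1 <<< (nb - 1).toNat then v - 1 <<< nb.toNat else v

def read_rect_py_alt (data : List Int) (off : Int) : Int × Int × Int × Int × Int :=
  match PySem.List.pyGet? data off with
  | none => (0, 0, 0, 0, 0)   -- IndexError (outside Pre_)
  | some b0 =>
    let nb : Int := b0 >>> (3 : Nat)
    if nb == 0 then (0, 0, 0, 0, 1) else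
      match pvField data off nb 0, pvField data off nb 1,
            pvField data off nb 2, pvField data off nb 3 with
      | some xmin, some xmax, some ymin, some ymax =>
          (xmin, ymin, max 0 (xmax - xmin), max 0 (ymax - ymin),
           PySem.Int.floordiv (5 + nb * 4 + 7) 8)
      | _, _, _, _ => (0, 0, 0, 0, 0)   -- IndexError (outside Pre_)

-- ===== PRECONDITION & SPEC =====
-- Pre_ excludes (a) inputs on which A raises (off out of range → IndexError; a negative
-- data[off] → negative shift count → ValueError; a truncated buffer → IndexError), and
-- (b) buffers whose accessed entries are not bytes (outside 0..255): there A's value is an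
-- accidental OR-mashup of overlapping bit patterns of the big-integer accumulation — a
-- defensible-corner artefact no byte-stream decoder would specify.
def Pre_read_rect_py (data : List Int) (off : Int) : Prop :=
  PySem.Raise.InRange data.length off ∧
  0 ≤ PySem.List.pyGetD data off 0 ∧ PySem.List.pyGetD data off 0 ≤ 255 ∧
  ∀ i ∈ PySem.List.pyRange 0
      (PySem.Int.floordiv (5 + (PySem.List.pyGetD data off 0 >>> (3 : Nat)) * 4 + 7) 8) 1,
    PySem.Raise.InRange data.length (off + i) ∧
    0 ≤ PySem.List.pyGetD data (off + i) 0 ∧ PySem.List.pyGetD data (off + i) 0 ≤ 255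
instance (data : List Int) (off : Int) : Decidable (Pre_read_rect_py data off) := by
  unfold Pre_read_rect_py; infer_instance

def pvWitness_read_rect_py : List Int × Int := ([13, 7], 0)

def Spec_read_rect_py (data : List Int) (off : Int) (out : Int × Int × Int × Int × Int) : Prop :=
  out = read_rect_py_alt data off
instance (data : List Int) (off : Int) (out : Int × Int × Int × Int × Int) :
    Decidable (Spec_read_rect_py data off out) := by unfold Spec_read_rect_py; infer_instance

-- ===== CLAIM (what is proved, stated in full; the proofs are below) =====
def Claim_equal_read_rect_py : Prop := ∀ (data : List Int) (off : Int),
  Dom_read_rect_py data off → Pre_read_rect_py data off →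
  Spec_read_rect_py data off (read_rect_py data off)

-- ===== LEMMAS AND PROOFS =====

theorem pvLor (a b k : Nat) (h : b < 2^k) : (a <<< k) ||| b = a * 2^k + b := by
  apply Nat.eq_of_testBit_eq
  intro i
  rw [Nat.testBit_lor, Nat.testBit_shiftLeft]
  rcases Nat.lt_or_ge i k with hik | hik
  · have h1 : Nat.testBit (a * 2^k + b) i = Nat.testBit b i := by
      rw [mul_comm, Nat.testBit_two_pow_mul_add a h]
      simp [hik]
    simp [h1, Nat.not_le.mpr hik]
  · have hb : Nat.testBit b i = false :=
      Nat.testBit_lt_two_pow (lt_of_lt_of_le h (Nat.pow_le_pow_right (by norm_num) hik))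
    have h1 : Nat.testBit (a * 2^k + b) i = Nat.testBit a (i - k) := by
      rw [mul_comm, Nat.testBit_two_pow_mul_add a h]
      simp [Nat.not_lt.mpr hik]
    simp [h1, hb, hik]

theorem pvModWin (x s : Nat) (h : s < 8) : (x % 2^8) / 2^s % 2 = x / 2^s % 2 := by
  have h1 := Nat.testBit_mod_two_pow x 8 s
  rw [Nat.testBit_eq_decide_div_mod_eq, Nat.testBit_eq_decide_div_mod_eq] at h1
  simp only [h, decide_true, Bool.true_and] at h1
  rw [decide_eq_decide] at h1
  have a := Nat.mod_two_eq_zero_or_one ((x % 2^8) / 2^s)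
  have b := Nat.mod_two_eq_zero_or_one (x / 2^s)
  omega

theorem pvOptFold {α β σ : Type} (l : List α) (h : α → Option β) (f : α → β) (g : σ → β → σ)
    (hl : ∀ p ∈ l, h p = some (f p)) (a0 : σ) :
    l.foldl (fun acc p => acc.bind fun v => (h p).map fun b => g v b) (some a0)
      = some (l.foldl (fun v p => g v (f p)) a0) := by
  induction l generalizing a0 with
  | nil => rfl
  | cons x t ih =>
    simp only [List.foldl_cons, Option.bind_some, hl x (by simp), Option.map_some]
    exact ih (fun p hp => hl p (by simp [hp])) _

theorem pvFoldCast (k : Nat) {α : Type} (l : List α) (f : α → Nat) (hf : ∀ p ∈ l, f p < 2^k)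
    (aN : Nat) :
    l.foldl (fun v p => PySem.Int.bor (v <<< k) ((f p : Nat) : Int)) (aN : Int)
      = ((l.foldl (fun v p => v * 2^k + f p) aN : Nat) : Int) := by
  induction l generalizing aN with
  | nil => rfl
  | cons x t ih =>
    simp only [List.foldl_cons]
    have h1 : ((aN : Int) <<< k) = ((aN <<< k : Nat) : Int) := rfl
    rw [h1, PySem.Int.bor_natCast, pvLor _ _ _ (hf x (by simp))]
    exact ih (fun p hp => hf p (by simp [hp])) _

theorem pvFoldV (x : Nat → Nat) : ∀ (M : Nat), (∀ j, j < M → x j < 256) → ∀ j, j < M →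
    (List.range M).foldl (fun a t => a * 256 + x t) 0 / 256^(M-1-j) % 256 = x j := by
  intro M
  induction M with
  | zero => omega
  | succ M ih =>
    intro hx j hj
    rw [List.range_succ, List.foldl_append]
    simp only [List.foldl_cons, List.foldl_nil]
    rcases Nat.lt_or_ge j M with hjM | hjM
    · have he : M + 1 - 1 - j = (M - 1 - j) + 1 := by omega
      rw [he, pow_succ, ← Nat.div_div_eq_div_mul]
      have hcomm : ∀ a : Nat, a / 256^(M-1-j) / 256 = a / 256 / 256^(M-1-j) := by
        intro a
        rw [Nat.div_div_eq_div_mul, mul_comm, ← Nat.div_div_eq_div_mul]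
      rw [hcomm]
      have : ((List.range M).foldl (fun a t => a * 256 + x t) 0 * 256 + x M) / 256
           = (List.range M).foldl (fun a t => a * 256 + x t) 0 := by
        have hxM : x M < 256 := hx M (by omega)
        omega
      rw [this]
      exact ih (fun j hj => hx j (by omega)) j hjM
    · have hjeq : j = M := by omega
      subst hjeq
      simp only [Nat.succ_sub_one, Nat.sub_self, pow_zero, Nat.div_one]
      have hxM : x j < 256 := hx j (by omega)
      omega

theorem pvBitsFold (V T : Nat) : ∀ (L p0 : Nat), p0 + L ≤ T →
    (List.range L).foldl (fun v j => v * 2 + V / 2^(T-1-(p0+j)) % 2) 0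
      = V / 2^(T-(p0+L)) % 2^L := by
  intro L
  induction L with
  | zero => intro p0 _; simp [Nat.mod_one]
  | succ L ih =>
    intro p0 hT
    rw [List.range_succ, List.foldl_append]
    simp only [List.foldl_cons, List.foldl_nil]
    rw [ih p0 (by omega)]
    have hA : T - (p0 + L) = (T - (p0 + (L+1))) + 1 := by omega
    have hB : T - 1 - (p0 + L) = T - (p0 + (L+1)) := by omega
    rw [show (2:Nat)^(L+1) = 2*2^L by ring, Nat.mod_mul, hA, hB, pow_succ,
        ← Nat.div_div_eq_div_mul]
    ring

theorem pvGetSome {α : Type} (xs : List α) (i : Int) (d : α)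
    (h : PySem.Raise.InRange xs.length i) :
    PySem.List.pyGet? xs i = some (PySem.List.pyGetD xs i d) := by
  cases heq : PySem.List.pyGet? xs i with
  | none => exact absurd ((PySem.List.pyGet?_eq_none_iff xs i).mp heq) (fun hn => hn h)
  | some b => simp [PySem.List.pyGetD, heq]


theorem pvBitX (x : Nat → Nat) (M : Nat) (hx : ∀ j, j < M → x j < 256) (p : Nat)
    (hp : p < 8*M) :
    (List.range M).foldl (fun a t => a * 256 + x t) 0 / 2^(8*M-1-p) % 2
      = x (p/8) / 2^(7-p%8) % 2 := by
  have hj : p / 8 < M := by omega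
  have he : 8*M-1-p = 8*(M-1-p/8) + (7-p%8) := by omega
  have h256 : (256:Nat)^(M-1-p/8) = 2^(8*(M-1-p/8)) := by
    rw [show (256:Nat) = 2^8 by norm_num, ← pow_mul]
  have hbyte := pvFoldV x M hx (p/8) hj
  rw [he, pow_add, ← Nat.div_div_eq_div_mul]
  rw [← pvModWin _ _ (by omega : 7 - p%8 < 8)]
  rw [show (2:Nat)^8 = 256 from by norm_num, ← h256, hbyte]


def pvSgn (nbI v : Int) : Int :=
  if v ≥ 1 <<< (nbI - 1).toNat then v - 1 <<< nbI.toNat else v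

theorem pvFieldEval (data : List Int) (off nbI : Int) (n M : Nat) (x : Nat → Nat)
    (k : Int) (kN : Nat) (hk : k = (kN : Int)) (hkN : kN < 4)
    (hnb : nbI = (n : Int))
    (hM : 4*n + 5 ≤ 8*M)
    (hbyte : ∀ j : Nat, j < M → PySem.List.pyGet? data (off + (j : Int)) = some ((x j : Nat) : Int))
    (hxlt : ∀ j : Nat, j < M → x j < 256) :
    pvField data off nbI k = some (pvSgn nbI
      (((List.range M).foldl (fun a t => a * 256 + x t) 0 / 2^(8*M - (5+(kN+1)*n)) % 2^n : Nat) : Int)) := by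
  have hc : (kN+1)*n ≤ 4*n := Nat.mul_le_mul_right n (by omega)
  have hc0 : kN*n ≤ 3*n := Nat.mul_le_mul_right n (by omega)
  have hkn : (kN : Int) * (n : Int) = ((kN*n : Nat) : Int) := by push_cast; ring
  have hkn1 : ((kN : Int) + 1) * (n : Int) = (((kN+1)*n : Nat) : Int) := by push_cast; ring
  unfold pvField
  set VN := (List.range M).foldl (fun a t => a * 256 + x t) 0 with hVN
  have hbit : ∀ p ∈ PySem.List.pyRange (5 + k*nbI) (5 + (k+1)*nbI) 1,
      pvBit data off p = some ((VN / 2^(8*M - 1 - p.toNat) % 2 : Nat) : Int) := by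
    intro p hp
    rw [PySem.List.mem_pyRange_one] at hp
    rw [hk, hnb, hkn, hkn1] at hp
    have hq0 : 0 ≤ p := by omega
    set q := p.toNat with hqdef
    have hqp : p = (q : Int) := (Int.toNat_of_nonneg hq0).symm
    have hqlo : 5 + kN*n ≤ q := by omega
    have hqhi : q < 5 + (kN+1)*n := by omega
    have hq8 : q < 8*M := by omega
    have hjM : q / 8 < M := by omega
    unfold pvBit
    rw [hqp, show ((8:Int)) = ((8:Nat):Int) from rfl, PySem.Int.floordiv_natCast,
        PySem.Int.mod_natCast, hbyte _ hjM]
    simp only [Option.map_some]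
    congr 1
    have h7 : ((7:Int) - ((q % 8 : Nat) : Int)).toNat = 7 - q % 8 := by omega
    rw [h7]
    have hsh : ∀ a s : Nat, ((a : Nat) : Int) >>> s = ((a >>> s : Nat) : Int) := fun a s => rfl
    rw [hsh, show ((1:Int)) = ((1:Nat):Int) from rfl, PySem.Int.band_natCast]
    rw [Nat.and_one_is_mod, Nat.shiftRight_eq_div_pow]
    have hbx := pvBitX x M hxlt q hq8
    rw [← hVN] at hbx
    exact_mod_cast hbx.symm
  rw [pvOptFold (PySem.List.pyRange (5 + k*nbI) (5 + (k+1)*nbI) 1)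
        (fun p => pvBit data off p)
        (fun p => ((VN / 2^(8*M - 1 - p.toNat) % 2 : Nat) : Int))
        (fun v b => PySem.Int.bor (v <<< (1:Nat)) b) hbit 0]
  have hrange : PySem.List.pyRange (5 + k*nbI) (5 + (k+1)*nbI) 1
      = (List.range n).map (fun j : Nat => (5 + k*nbI) + (j : Int)) := by
    rw [PySem.List.pyRange_one]
    have h5 : (5 + (k+1)*nbI - (5 + k*nbI)) = (n : Int) := by rw [hnb]; ring
    rw [h5, Int.toNat_natCast]
  rw [hrange, List.foldl_map]
  have hbody : ∀ (v : Int) (j : Nat), j ∈ List.range n →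
      PySem.Int.bor (v <<< (1:Nat)) ((VN / 2^(8*M - 1 - ((5 + k*nbI) + (j:Int)).toNat) % 2 : Nat) : Int)
        = PySem.Int.bor (v <<< (1:Nat)) ((VN / 2^(8*M - 1 - (5 + kN*n + j)) % 2 : Nat) : Int) := by
    intro v j hj
    have : ((5 + k*nbI) + (j:Int)).toNat = 5 + kN*n + j := by
      rw [hk, hnb, hkn]; omega
    rw [this]
  rw [List.foldl_ext _ _ 0 hbody]
  rw [show (0:Int) = ((0:Nat):Int) from by norm_num]
  rw [pvFoldCast 1 (List.range n) (fun j => VN / 2^(8*M - 1 - (5 + kN*n + j)) % 2)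
        (fun p _ => by
          have h2 := Nat.mod_lt (VN / 2^(8*M - 1 - (5 + kN*n + p))) (show 0 < 2 by norm_num)
          simpa using h2) 0]
  simp only [pow_one]
  rw [pvBitsFold VN (8*M) n (5 + kN*n) (by omega)]
  simp only [Option.map_some]
  have hexp : 8*M - (5 + kN*n + n) = 8*M - (5 + (kN+1)*n) := by
    congr 1; ring
  rw [hexp]
  rfl



theorem pvExtract' (a n : Nat) :
    PySem.Int.band ((a : Int)) (((1 <<< n : Nat) : Int) - 1) = ((a % 2^n : Nat) : Int) := by
  rw [Nat.one_shiftLeft]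
  rw [show (((2:Nat)^n : Nat) : Int) - 1 = ((2^n - 1 : Nat) : Int) from by
        rw [Nat.cast_sub Nat.one_le_two_pow]; push_cast; ring]
  rw [PySem.Int.band_natCast, Nat.and_two_pow_sub_one_eq_mod]

-- ===== VERDICT (by name: the statement is the Claim_ definition above) =====
theorem read_rect_py_spec : Claim_equal_read_rect_py := by
  intro data off _hDom hPre
  unfold Spec_read_rect_py
  obtain ⟨hin, hb0lo, hb0hi, hbytes⟩ := hPre
  have hget : PySem.List.pyGet? data off = some (PySem.List.pyGetD data off 0) :=
    pvGetSome data off 0 hin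
  set b0 := PySem.List.pyGetD data off 0 with hb0def
  by_cases hz : b0 >>> (3:Nat) = 0
  · simp [read_rect_py, read_rect_py_alt, hget, hz]
  · have hsh8 : ∀ (a s : Nat), ((a : Nat) : Int) >>> s = ((a >>> s : Nat) : Int) :=
      fun _ _ => rfl
    have hcastb : b0 = ((b0.toNat : Nat) : Int) := (Int.toNat_of_nonneg hb0lo).symm
    have h0 : b0 >>> (3:Nat) = ((b0.toNat >>> 3 : Nat) : Int) := by
      conv_lhs => rw [hcastb]
      exact hsh8 _ _
    set n : Nat := (b0 >>> (3:Nat)).toNat with hndef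
    have hnb : b0 >>> (3:Nat) = (n : Int) := by rw [hndef]; omega
    have hn1 : 1 ≤ n := by
      rcases Nat.eq_zero_or_pos n with h | h
      · exact absurd (by rw [hnb, h]; rfl) hz
      · exact h
    set M : Nat := (4*n+12)/8 with hMdef
    have hM : 4*n + 5 ≤ 8*M := by omega
    have hm : PySem.Int.floordiv (5 + (b0 >>> (3:Nat)) * 4 + 7) 8 = (M : Int) := by
      rw [hnb]
      have e1 : (5 + (n:Int) * 4 + 7) = ((4*n+12 : Nat) : Int) := by push_cast; ring
      rw [e1, show ((8:Int)) = ((8:Nat):Int) from rfl, PySem.Int.floordiv_natCast]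
    rw [hm] at hbytes
    set x : Nat → Nat := fun j => (PySem.List.pyGetD data (off + (j:Int)) 0).toNat with hxdef
    have hbyte : ∀ j : Nat, j < M →
        PySem.List.pyGet? data (off + (j:Int)) = some ((x j : Nat) : Int) ∧ x j < 256 := by
      intro j hj
      have hmem : ((j:Int)) ∈ PySem.List.pyRange 0 (M:Int) 1 := by
        rw [PySem.List.mem_pyRange_one]
        constructor <;> omega
      obtain ⟨hir, hlo, hhi⟩ := hbytes _ hmem
      refine ⟨?_, by show (PySem.List.pyGetD data (off + (j:Int)) 0).toNat < 256; omega⟩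
      have hg := pvGetSome data (off + (j:Int)) 0 hir
      rw [hg]
      congr 1
      show PySem.List.pyGetD data (off + (j:Int)) 0 = ((PySem.List.pyGetD data (off + (j:Int)) 0).toNat : Int)
      exact (Int.toNat_of_nonneg hlo).symm
    have hbyte1 : ∀ j : Nat, j < M →
        PySem.List.pyGet? data (off + (j:Int)) = some ((x j : Nat) : Int) :=
      fun j hj => (hbyte j hj).1
    have hxlt : ∀ j : Nat, j < M → x j < 256 := fun j hj => (hbyte j hj).2
    have hF0 := pvFieldEval data off (b0 >>> (3:Nat)) n M x 0 0 (by norm_num) (by norm_num) hnb hM hbyte1 hxlt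
    have hF1 := pvFieldEval data off (b0 >>> (3:Nat)) n M x 1 1 (by norm_num) (by norm_num) hnb hM hbyte1 hxlt
    have hF2 := pvFieldEval data off (b0 >>> (3:Nat)) n M x 2 2 (by norm_num) (by norm_num) hnb hM hbyte1 hxlt
    have hF3 := pvFieldEval data off (b0 >>> (3:Nat)) n M x 3 3 (by norm_num) (by norm_num) hnb hM hbyte1 hxlt
    have hzf : (b0 >>> (3:Nat) == (0:Int)) = false := by simpa using hz
    simp only [read_rect_py, read_rect_py_alt, hget, hm, hF0, hF1, hF2, hF3, hzf,
               Bool.false_eq_true, if_false]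
    have hlA : ∀ p ∈ PySem.List.pyRange 0 (M:Int) 1,
        PySem.List.pyGet? data (off + p) = some ((x p.toNat : Nat) : Int) := by
      intro p hp
      rw [PySem.List.mem_pyRange_one] at hp
      have hq : p = ((p.toNat : Nat) : Int) := (Int.toNat_of_nonneg hp.1).symm
      conv_lhs => rw [hq]
      exact hbyte1 p.toNat (by omega)
    rw [pvOptFold (PySem.List.pyRange 0 (M:Int) 1)
          (fun i => PySem.List.pyGet? data (off + i))
          (fun i => ((x i.toNat : Nat) : Int))
          (fun v b => PySem.Int.bor (v <<< (8:Nat)) b) hlA 0]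
    have hrangeA : PySem.List.pyRange 0 (M:Int) 1 = (List.range M).map (fun j : Nat => ((j:Nat):Int)) := by
      rw [PySem.List.pyRange_one]
      norm_num
    rw [hrangeA, List.foldl_map]
    simp only [Int.toNat_natCast]
    rw [show (0:Int) = ((0:Nat):Int) from by norm_num,
        pvFoldCast 8 (List.range M) x
          (fun j hj => by have := hxlt j (List.mem_range.mp hj); norm_num; omega)]
    simp only [show (2:Nat)^8 = 256 from by norm_num, Nat.cast_zero]
    simp only [pvSgn, hnb]
    have hpad : (((M:Int))*8 - (5 + (n:Int)*4)).toNat = 8*M - (4*n+5) := by omega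
    have h3n : ((3:Int) * (n:Int)).toNat = 3*n := by omega
    have h2n : ((2:Int) * (n:Int)).toNat = 2*n := by omega
    have hsub1 : ((n:Int) - 1).toNat = n - 1 := by omega
    simp only [hpad, h3n, h2n, hsub1, Int.toNat_natCast]
    simp only [hsh8, Nat.shiftRight_eq_div_pow]
    simp only [pvExtract']
    simp only [Nat.div_div_eq_div_mul, ← pow_add]
    have e0 : 8*M - (4*n+5) + 3*n = 8*M - (5 + (0+1)*n) := by omega
    have e1 : 8*M - (4*n+5) + 2*n = 8*M - (5 + (1+1)*n) := by omega
    have e2 : 8*M - (4*n+5) + n = 8*M - (5 + (2+1)*n) := by omega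
    rw [e0, e1, e2]
    have e3 : 8*M - (4*n+5) = 8*M - (5 + (3+1)*n) := by omega
    rw [e3]
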